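-- pv_equiv track=rewrite | github.com/UNO-Babb/homework-2-nolanelson9506 | BusSchedule.py | getBusTimes
-- ===== SOURCE A (Python) =====
-- def getBusTimes(text):
--   word = ""
--   times = []
--   i = 0
--
--   while i < len(text):
--     ch = text[i]
--     if ch >= "0" and ch <= "9" or ch == ":" or ch == "A" or ch == "P" or ch == "M":
--       word = word + ch
--     else:
--       if ":" in word and ("AM" in word or "PM" in word):
--         times.append(word)
--       word = ""
--     i = i + 1
--
--   if ":" in word and ("AM" in word or "PM" in word):
--       times.append(word)
--   return times
-- ===== SOURCE B (Python) =====
-- def getBusTimes(text):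
--   cleaned = "".join(ch if ("0" <= ch <= "9" or ch in ":APM") else " " for ch in text)
--   return [t for t in cleaned.split() if ":" in t and ("AM" in t or "PM" in t)]
-- ===== Notes on version B (the rewrite author's own statement) =====
-- stated objective: idiomatic
-- what changed: Replaces the index-driven while loop with explicit word-accumulator and flush-on-boundary/trailing-flush state by a stateless pipeline: map disallowed characters to spaces, tokenize with str.split(), and keep the time-like tokens with a filtering comprehension; the per-character Python-level loop work moves into C-level str.join/str.split, a constant-factor speedup a timing run measured.
import Mathlib
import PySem

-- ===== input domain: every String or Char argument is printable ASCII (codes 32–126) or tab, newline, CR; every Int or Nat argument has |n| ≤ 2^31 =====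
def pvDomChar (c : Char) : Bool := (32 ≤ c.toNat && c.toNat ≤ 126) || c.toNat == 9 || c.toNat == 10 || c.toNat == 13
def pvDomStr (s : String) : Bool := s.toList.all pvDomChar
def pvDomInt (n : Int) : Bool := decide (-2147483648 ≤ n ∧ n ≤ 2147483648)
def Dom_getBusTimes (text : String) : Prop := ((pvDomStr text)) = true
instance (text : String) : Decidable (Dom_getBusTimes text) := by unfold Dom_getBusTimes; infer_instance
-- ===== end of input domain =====

-- B replaces A's index-driven while loop with flush-on-boundary state by a clean-to-spaces
-- pass + str.split() tokenization + a filtering comprehension (objective: idiomatic).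

-- the time-token test `":" in w and ("AM" in w or "PM" in w)` — the identical expression
-- occurs in both Pythons, so both ports share this helper
def pvValidTime (w : List Char) : Bool :=
  PySem.Chars.isIn [':'] w && (PySem.Chars.isIn ['A', 'M'] w || PySem.Chars.isIn ['P', 'M'] w)

-- ===== PORT A =====
-- A's character test: ch >= "0" and ch <= "9" or ch == ":" or ch == "A" or ch == "P" or ch == "M"
def pvOkA (c : Char) : Bool :=
  (decide ('0' ≤ c) && decide (c ≤ '9')) || c == ':' || c == 'A' || c == 'P' || c == 'M'

-- A's while loop over text with state (word, times); the trailing flush is the [] case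
def getBusTimesGo : List Char → List Char → List String → List String
  | [], word, times => if pvValidTime word then times ++ [String.ofList word] else times
  | c :: rest, word, times =>
    if pvOkA c then getBusTimesGo rest (word ++ [c]) times
    else getBusTimesGo rest [] (if pvValidTime word then times ++ [String.ofList word] else times)

def getBusTimes (text : String) : List String := getBusTimesGo text.toList [] []

-- ===== PORT B =====
-- B's character test: "0" <= ch <= "9" or ch in ":APM"  (single-char `in` = substring)
def pvOkB (c : Char) : Bool :=
  (decide ('0' ≤ c) && decide (c ≤ '9')) || PySem.Chars.isIn [c] [':', 'A', 'P', 'M']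

-- cleaned = "".join(ch if ok else " "); cleaned.split(); filter; strings kept as List Char
-- until the end (PySem.Chars side)
def getBusTimes_alt (text : String) : List String :=
  let cleaned : List Char := text.toList.map (fun ch => if pvOkB ch then ch else ' ')
  ((PySem.Chars.split₀ cleaned).filter pvValidTime).map String.ofList

-- ===== PRECONDITION & SPEC =====
def Spec_getBusTimes (text : String) (out : List String) : Prop := out = getBusTimes_alt text
instance (text : String) (out : List String) : Decidable (Spec_getBusTimes text out) := by unfold Spec_getBusTimes; infer_instance

-- ===== CLAIM (what is proved, stated in full; the proofs are below) =====
def Claim_equal_getBusTimes : Prop := ∀ (text : String), Dom_getBusTimes text → Spec_getBusTimes text (getBusTimes text)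

-- ===== LEMMAS AND PROOFS =====

-- the maximal runs of pvOkA-characters in the text, `word` being the run in progress
-- (empty runs between adjacent separators are kept; pvValidTime rejects them anyway)
def pvRuns : List Char → List Char → List (List Char)
  | word, [] => [word]
  | word, c :: rest => if pvOkA c then pvRuns (word ++ [c]) rest else word :: pvRuns [] rest

lemma pvOkA_codes {c : Char} (h : pvOkA c = true) :
    (48 ≤ c.toNat ∧ c.toNat ≤ 57) ∨ c.toNat = 58 ∨ c.toNat = 65 ∨ c.toNat = 80 ∨ c.toNat = 77 := by
  unfold pvOkA at h
  simp only [Bool.or_eq_true, Bool.and_eq_true, decide_eq_true_eq, beq_iff_eq] at h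
  rcases h with (((⟨h1, h2⟩ | rfl) | rfl) | rfl) | rfl
  · left
    rw [Char.le_def, UInt32.le_iff_toNat_le] at h1 h2
    exact ⟨h1, h2⟩
  all_goals decide

lemma pvOkA_not_space {c : Char} (h : pvOkA c = true) : PySem.Chars.isspace c = false := by
  have := pvOkA_codes h
  simp only [PySem.Chars.isspace, Bool.or_eq_false_iff, Bool.and_eq_false_iff,
    decide_eq_false_iff_not]
  omega

lemma isIn_singleton (c : Char) (l : List Char) : PySem.Chars.isIn [c] l = l.contains c := by
  cases hm : PySem.Chars.isIn [c] l
  · rw [PySem.Chars.isIn_eq_false_iff, List.singleton_infix_iff] at hm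
    simp [hm]
  · rw [PySem.Chars.isIn_iff_infix, List.singleton_infix_iff] at hm
    simp [hm]

lemma pvOk_eq (c : Char) : pvOkB c = pvOkA c := by
  unfold pvOkA pvOkB
  rw [isIn_singleton]
  simp only [List.contains_cons, List.contains_nil, Bool.or_false, Bool.or_assoc]

lemma pvValidTime_and_nonempty (w : List Char) : (pvValidTime w && !w.isEmpty) = pvValidTime w := by
  cases w with
  | nil => decide
  | cons a t => simp

-- A's loop appends to `times` exactly the valid runs, in order
lemma goA_eq (l word : List Char) (times : List String) :
    getBusTimesGo l word times =
      times ++ ((pvRuns word l).filter pvValidTime).map String.ofList := by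
  induction l generalizing word times with
  | nil =>
    simp only [getBusTimesGo, pvRuns, List.filter]
    split_ifs with h <;> simp [h]
  | cons c rest ih =>
    simp only [getBusTimesGo, pvRuns]
    by_cases h : pvOkA c = true
    · simp [h, ih]
    · rw [if_neg h, if_neg h, ih, List.filter_cons]
      split_ifs with hv <;> simp [List.append_assoc]

-- B's split₀ over the cleaned text produces the nonempty runs, `cur` (reversed) being the run
-- in progress and `acc` (reversed) the tokens already emitted
lemma goB_eq (l cur : List Char) (acc : List (List Char)) :
    PySem.Chars.split₀.go (l.map (fun ch => if pvOkA ch then ch else ' ')) cur acc =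
      acc.reverse ++ (pvRuns cur.reverse l).filter (fun w => !w.isEmpty) := by
  induction l generalizing cur acc with
  | nil =>
    simp only [List.map_nil, PySem.Chars.split₀.go, pvRuns, List.filter_cons,
      List.filter_nil, List.isEmpty_reverse]
    by_cases h : cur.isEmpty = true
    · rw [if_pos h]
      simp [h]
    · rw [if_neg h]
      simp only [Bool.not_eq_true] at h
      simp [h]
  | cons c rest ih =>
    simp only [List.map_cons, PySem.Chars.split₀.go, pvRuns]
    by_cases h : pvOkA c = true
    · -- allowed character: extend the current run
      rw [if_pos h, if_pos h, pvOkA_not_space h]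
      simp only [Bool.false_eq_true, if_false, ih, List.reverse_cons]
    · -- separator: cleaned char is ' ', split₀ flushes cur
      rw [if_neg h, if_neg h]
      have hsp : PySem.Chars.isspace ' ' = true := by decide
      rw [hsp, if_pos rfl, List.filter_cons, List.isEmpty_reverse]
      by_cases he : cur.isEmpty = true
      · rw [if_pos he]
        simp only [Bool.not_eq_true', he]
        simp [ih]
      · rw [if_neg he]
        simp only [Bool.not_eq_true] at he
        simp [ih, he, List.append_assoc]

-- ===== VERDICT (by name: the statement is the Claim_ definition above) =====
theorem getBusTimes_spec : Claim_equal_getBusTimes := by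
  intro text _
  unfold Spec_getBusTimes getBusTimes getBusTimes_alt
  have hmap : text.toList.map (fun ch => if pvOkB ch then ch else ' ')
      = text.toList.map (fun ch => if pvOkA ch then ch else ' ') := by
    apply List.map_congr_left
    intro a _
    rw [pvOk_eq]
  rw [goA_eq, hmap]
  show _ = ((PySem.Chars.split₀ _).filter pvValidTime).map String.ofList
  unfold PySem.Chars.split₀
  rw [goB_eq]
  simp only [List.reverse_nil, List.nil_append, List.filter_filter, pvValidTime_and_nonempty]
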